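-- pv_equiv track=rewrite | github.com/chris026/YOM-Word2Vec | tests/userid_orders_report.py | group_products_by_order
-- ===== SOURCE A (Python) =====
-- from collections import defaultdict
--
-- def group_products_by_order(rows: list[tuple[str, str, str]], user_id: str) -> dict[str, list[str]]:
--     grouped: dict[str, list[str]] = defaultdict(list)
--     seen_per_order: dict[str, set[str]] = defaultdict(set)
--
--     for row_user, order_id, product_id in rows:
--         if row_user != user_id:
--             continue
--         if not order_id or not product_id:
--             continue
--         if product_id in seen_per_order[order_id]:
--             continue
--
--         grouped[order_id].append(product_id)
--         seen_per_order[order_id].add(product_id)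
--
--     return dict(grouped)
-- ===== SOURCE B (Python) =====
-- def group_products_by_order(rows: list[tuple[str, str, str]], user_id: str) -> dict[str, list[str]]:
--     # Stage 1: project the relevant rows to (order, product) pairs.
--     pairs = [(o, p) for u, o, p in rows if u == user_id and o and p]
--     # Stage 2: distinct order ids in first-seen order; stage 3: per-order scan of the pairs.
--     return {o: list(dict.fromkeys(p for oo, p in pairs if oo == o))
--             for o in dict.fromkeys(o for o, _ in pairs)}
-- ===== Notes on version B (the rewrite author's own statement) =====
-- stated objective: alternative
-- what changed: Replaces A's single-pass grouping with mutable per-order list+seen-set state by a staged declarative pipeline: first project matching rows to (order, product) pairs, then take the distinct order ids in first-seen order, then for each order run a separate scan of the pairs and dedup with dict.fromkeys.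
import Mathlib
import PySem

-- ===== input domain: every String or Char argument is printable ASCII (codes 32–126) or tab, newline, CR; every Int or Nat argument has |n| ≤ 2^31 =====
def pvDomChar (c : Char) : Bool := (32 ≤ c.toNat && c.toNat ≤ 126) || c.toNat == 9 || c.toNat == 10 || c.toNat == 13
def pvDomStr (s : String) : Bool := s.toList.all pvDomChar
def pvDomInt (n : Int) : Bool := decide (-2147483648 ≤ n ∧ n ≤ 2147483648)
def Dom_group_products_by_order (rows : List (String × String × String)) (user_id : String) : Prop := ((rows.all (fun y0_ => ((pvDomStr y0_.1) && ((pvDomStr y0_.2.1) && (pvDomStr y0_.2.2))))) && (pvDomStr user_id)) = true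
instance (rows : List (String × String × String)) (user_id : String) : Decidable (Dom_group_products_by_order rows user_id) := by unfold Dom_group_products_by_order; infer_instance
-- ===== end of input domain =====

-- B replaces A's single stateful pass (per-order list + seen-set, explicit `continue`s) by a
-- staged pipeline: project matching rows to (order, product) pairs, take the distinct order ids
-- in first-seen order, then one deduplicating scan of the pairs per order. Alternative, same result.

-- ===== PORT A =====
-- one loop iteration of A: state = (grouped, seen_per_order)
def pvStepA (user_id : String)
    (st : PySem.Dict String (List String) × PySem.Dict String (PySem.Set String))
    (row : String × String × String) :
    PySem.Dict String (List String) × PySem.Dict String (PySem.Set String) :=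
  if row.1 ≠ user_id then st
  else if row.2.1 = "" ∨ row.2.2 = "" then st
  else
    -- seen_per_order[order_id]: defaultdict access materialises the key
    let seen1 := st.2.setdefault row.2.1 PySem.Set.empty
    let s := seen1.getD row.2.1 PySem.Set.empty
    if PySem.Set.contains s row.2.2 then (st.1, seen1)
    else (st.1.modify row.2.1 [] (· ++ [row.2.2]), seen1.insert row.2.1 (PySem.Set.add s row.2.2))

def group_products_by_order (rows : List (String × String × String)) (user_id : String) : List (String × List String) :=
  (rows.foldl (pvStepA user_id) (PySem.Dict.empty, PySem.Dict.empty)).1.items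

-- ===== PORT B =====
def group_products_by_order_alt (rows : List (String × String × String)) (user_id : String) : List (String × List String) :=
  -- pairs = [(o, p) for u, o, p in rows if u == user_id and o and p]
  let pairs := rows.filterMap
    (fun r => if r.1 = user_id ∧ r.2.1 ≠ "" ∧ r.2.2 ≠ "" then some (r.2.1, r.2.2) else none)
  -- {o: list(dict.fromkeys(p for oo, p in pairs if oo == o)) for o in dict.fromkeys(o for o, _ in pairs)}
  (PySem.List.dedup (pairs.map Prod.fst)).map
    (fun o => (o, PySem.List.dedup (pairs.filterMap (fun q => if q.1 = o then some q.2 else none))))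

-- ===== PRECONDITION & SPEC =====
def Spec_group_products_by_order (rows : List (String × String × String)) (user_id : String) (out : List (String × List String)) : Prop := out = group_products_by_order_alt rows user_id
instance (rows : List (String × String × String)) (user_id : String) (out : List (String × List String)) : Decidable (Spec_group_products_by_order rows user_id out) := by unfold Spec_group_products_by_order; infer_instance

-- ===== CLAIM (what is proved, stated in full; the proofs are below) =====
def Claim_equal_group_products_by_order : Prop := ∀ (rows : List (String × String × String)) (user_id : String), Dom_group_products_by_order rows user_id → Spec_group_products_by_order rows user_id (group_products_by_order rows user_id)

-- ===== LEMMAS AND PROOFS =====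

-- proof-side intermediate: a unit-valued dict-of-dicts fold, halfway between A's stateful
-- loop and B's staged pipeline
def pvStepM (user_id : String)
    (g : PySem.Dict String (PySem.Dict String Unit))
    (row : String × String × String) :
    PySem.Dict String (PySem.Dict String Unit) :=
  if row.1 = user_id ∧ row.2.1 ≠ "" ∧ row.2.2 ≠ "" then
    g.modify row.2.1 PySem.Dict.empty (fun d => d.insert row.2.2 ())
  else g

def pvStepP (g : PySem.Dict String (PySem.Dict String Unit)) (q : String × String) :
    PySem.Dict String (PySem.Dict String Unit) :=
  g.modify q.1 PySem.Dict.empty (fun d => d.insert q.2 ())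

def pvPairs (rows : List (String × String × String)) (user_id : String) : List (String × String) :=
  rows.filterMap
    (fun r => if r.1 = user_id ∧ r.2.1 ≠ "" ∧ r.2.2 ≠ "" then some (r.2.1, r.2.2) else none)

def pvProds (o : String) (pairs : List (String × String)) : List String :=
  pairs.filterMap (fun q => if q.1 = o then some q.2 else none)

def pvG (pairs : List (String × String)) : List (String × List String) :=
  (PySem.Set.ofList (pairs.map Prod.fst)).map (fun o => (o, PySem.Set.ofList (pvProds o pairs)))

-- inserting a key that is already present into a Unit-valued dict changes nothing
theorem pv_unit_insert_of_contains (d : PySem.Dict String Unit) (p : String)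
    (h : d.contains p = true) : d.insert p () = d := by
  apply PySem.Dict.ext
  rw [PySem.Dict.items_insert_of_contains d () h]
  conv_rhs => rw [← List.map_id d.items]
  refine List.map_congr_left (fun q _ => ?_)
  obtain ⟨q1, q2⟩ := q
  by_cases hq : q1 = p
  · subst hq; cases q2; simp
  · simp [hq]

-- re-inserting a key with its current value changes nothing (unique keys)
theorem pv_insert_get?_self {ν : Type} (d : PySem.Dict String ν) (k : String) (v : ν)
    (hn : d.keys.Nodup) (h : d.get? k = some v) : d.insert k v = d := by
  have hc : d.contains k = true := by rw [PySem.Dict.contains_eq_isSome_get?, h]; rfl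
  apply PySem.Dict.ext
  rw [PySem.Dict.items_insert_of_contains d v hc]
  conv_rhs => rw [← List.map_id d.items]
  refine List.map_congr_left (fun q hq => ?_)
  obtain ⟨q1, q2⟩ := q
  by_cases hk : q1 = k
  · subst hk
    have hv := PySem.Dict.get?_of_mem_items d hq hn
    rw [h] at hv
    simp_all
  · simp [hk]

-- keys of the two grouped dicts coincide
theorem pv_keys_eq (g : PySem.Dict String (List String)) (b : PySem.Dict String (PySem.Dict String Unit))
    (hi : g.items = b.items.map (fun kv => (kv.1, kv.2.keys))) : g.keys = b.keys := by
  simp [PySem.Dict.keys, hi, List.map_map, Function.comp]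

-- the loop invariant relating A's fold state to the unit-dict fold
theorem pv_main (rows : List (String × String × String)) (user_id : String)
    (g : PySem.Dict String (List String)) (seen : PySem.Dict String (PySem.Set String))
    (b : PySem.Dict String (PySem.Dict String Unit))
    (hs : seen = g)
    (hi : g.items = b.items.map (fun kv => (kv.1, kv.2.keys)))
    (hn : b.keys.Nodup) :
    (rows.foldl (pvStepA user_id) (g, seen)).1.items
      = ((rows.foldl (pvStepM user_id) b).items).map (fun kv => (kv.1, kv.2.keys)) := by
  induction rows generalizing g seen b with
  | nil => simpa using hi
  | cons row rest ih =>
    obtain ⟨u, o, p⟩ := row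
    simp only [List.foldl_cons]
    by_cases hu : u = user_id
    · by_cases ho : o = "" ∨ p = ""
      · have ha : pvStepA user_id (g, seen) (u, o, p) = (g, seen) := by
          simp [pvStepA, hu, ho]
        have hb : pvStepM user_id b (u, o, p) = b := by
          rcases ho with ho | ho <;> simp [pvStepM, ho]
        rw [ha, hb]; exact ih g seen b hs hi hn
      · rw [not_or] at ho
        have hgb : g.keys = b.keys := pv_keys_eq g b hi
        have hgn : g.keys.Nodup := hgb ▸ hn
        by_cases hc : b.contains o = true
        · -- the order already has a group
          have hcg : g.contains o = true := by
            rw [PySem.Dict.contains_iff_mem_keys, hgb, ← PySem.Dict.contains_iff_mem_keys]; exact hc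
          obtain ⟨d, hd⟩ : ∃ d, b.get? o = some d := by
            rw [PySem.Dict.contains_eq_isSome_get?] at hc
            exact Option.isSome_iff_exists.mp hc
          have hgmem : (o, d.keys) ∈ g.items := by
            rw [hi]
            exact List.mem_map.mpr ⟨(o, d), PySem.Dict.mem_items_of_get?_eq_some b hd, rfl⟩
          have hg? : g.get? o = some d.keys := PySem.Dict.get?_of_mem_items g hgmem hgn
          have hsd : seen.getD o ([] : PySem.Set String) = d.keys := by
            rw [hs]; exact PySem.Dict.getD_of_get?_eq_some g _ hg?
          have hset : seen.setdefault o ([] : PySem.Set String) = seen :=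
            PySem.Dict.setdefault_of_contains seen _ (by rw [hs]; exact hcg)
          have hAred : pvStepA user_id (g, seen) (u, o, p)
              = (if p ∈ d.keys then (g, seen)
                 else (g.modify o [] (· ++ [p]), seen.insert o (PySem.Set.add d.keys p))) := by
            simp only [pvStepA, hu, ho.1, ho.2]
            simp [hset, hsd, PySem.Set.contains]
          by_cases hp : p ∈ d.keys
          · -- product already seen: both sides are unchanged
            have hdp : d.contains p = true := (PySem.Dict.contains_iff_mem_keys d p).mpr hp
            have hBred : pvStepM user_id b (u, o, p) = b := by
              simp only [pvStepM, if_pos (show u = user_id ∧ o ≠ "" ∧ p ≠ "" from ⟨hu, ho⟩)]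
              have : PySem.Dict.modify b o PySem.Dict.empty (fun d => d.insert p ())
                  = b.insert o ((b.getD o PySem.Dict.empty).insert p ()) := rfl
              rw [this, PySem.Dict.getD_of_get?_eq_some b _ hd,
                pv_unit_insert_of_contains d p hdp, pv_insert_get?_self b o d hn hd]
            rw [hAred, if_pos hp, hBred]
            exact ih g seen b hs hi hn
          · -- new product in an existing order
            have hdp : d.contains p = false := by
              rw [← Bool.not_eq_true, PySem.Dict.contains_iff_mem_keys]; exact hp
            have hkeys : (d.insert p ()).keys = d.keys ++ [p] :=
              PySem.Dict.keys_insert_of_not_contains d () hdp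
            have hAred2 : pvStepA user_id (g, seen) (u, o, p)
                = (g.insert o (d.keys ++ [p]), seen.insert o (d.keys ++ [p])) := by
              rw [hAred, if_neg hp]
              have hmod : PySem.Dict.modify g o [] (· ++ [p]) = g.insert o (g.getD o [] ++ [p]) := rfl
              rw [hmod, PySem.Dict.getD_of_get?_eq_some g _ hg?]
              have : PySem.Set.add d.keys p = d.keys ++ [p] := by
                simp [PySem.Set.add, PySem.Set.contains, hp]
              rw [this]
            have hBred2 : pvStepM user_id b (u, o, p) = b.insert o (d.insert p ()) := by
              simp only [pvStepM, if_pos (show u = user_id ∧ o ≠ "" ∧ p ≠ "" from ⟨hu, ho⟩)]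
              have : PySem.Dict.modify b o PySem.Dict.empty (fun d => d.insert p ())
                  = b.insert o ((b.getD o PySem.Dict.empty).insert p ()) := rfl
              rw [this, PySem.Dict.getD_of_get?_eq_some b _ hd]
            rw [hAred2, hBred2]
            refine ih _ _ _ ?_ ?_ ?_
            · rw [hs]
            · rw [PySem.Dict.items_insert_of_contains g _ hcg,
                PySem.Dict.items_insert_of_contains b _ hc, hi, List.map_map, List.map_map]
              refine List.map_congr_left (fun q hq => ?_)
              obtain ⟨q1, q2⟩ := q
              by_cases hqo : q1 = o
              · subst hqo
                have hv := PySem.Dict.get?_of_mem_items b hq hn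
                rw [hd] at hv
                simp only [Option.some.injEq] at hv
                subst hv
                simp [Function.comp, hkeys]
              · simp [Function.comp, hqo]
            · rw [PySem.Dict.keys_insert_of_contains b _ hc]; exact hn
        · -- a brand-new order id
          have hcb : b.contains o = false := by simpa using hc
          have hcg : g.contains o = false := by
            have hnm : o ∉ g.keys := by
              rw [hgb]
              intro hm
              exact absurd ((PySem.Dict.contains_iff_mem_keys b o).mpr hm) hc
            rw [← Bool.not_eq_true, PySem.Dict.contains_iff_mem_keys]
            exact hnm
          have hscb : seen.contains o = false := by rw [hs]; exact hcg
          have hset : seen.setdefault o ([] : PySem.Set String) = seen.insert o [] :=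
            PySem.Dict.setdefault_of_not_contains seen _ hscb
          have hAred : pvStepA user_id (g, seen) (u, o, p)
              = (g.insert o [p], (seen.insert o []).insert o [p]) := by
            simp only [pvStepA, hu, ho.1, ho.2]
            have hmod : PySem.Dict.modify g o [] (· ++ [p]) = g.insert o (g.getD o [] ++ [p]) := rfl
            simp [hset, PySem.Dict.getD_insert_self, PySem.Set.contains, PySem.Set.add,
              hmod, PySem.Dict.getD_of_not_contains g _ hcg]
          have hBred : pvStepM user_id b (u, o, p)
              = b.insert o (PySem.Dict.empty.insert p ()) := by
            simp only [pvStepM, if_pos (show u = user_id ∧ o ≠ "" ∧ p ≠ "" from ⟨hu, ho⟩)]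
            have : PySem.Dict.modify b o PySem.Dict.empty (fun d => d.insert p ())
                = b.insert o ((b.getD o PySem.Dict.empty).insert p ()) := rfl
            rw [this, PySem.Dict.getD_of_not_contains b _ hcb]
          rw [hAred, hBred]
          refine ih _ _ _ ?_ ?_ ?_
          · rw [hs, PySem.Dict.insert_insert_self]
          · have hk : (PySem.Dict.empty.insert p ()).keys = [p] := by
              rw [PySem.Dict.keys_insert_of_not_contains PySem.Dict.empty () (by simp)]
              simp
            rw [PySem.Dict.items_insert_of_not_contains g _ hcg,
              PySem.Dict.items_insert_of_not_contains b _ hcb, hi, List.map_append]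
            simp [hk]
          · rw [PySem.Dict.keys_insert_of_not_contains b _ hcb]
            refine hn.append (List.nodup_singleton o) (fun x hx hx' => ?_)
            simp only [List.mem_singleton] at hx'
            subst hx'
            exact absurd ((PySem.Dict.contains_iff_mem_keys b x).mpr hx) hc
    · have ha : pvStepA user_id (g, seen) (u, o, p) = (g, seen) := by simp [pvStepA, hu]
      have hb : pvStepM user_id b (u, o, p) = b := by simp [pvStepM, hu]
      rw [ha, hb]; exact ih g seen b hs hi hn

-- the unit-dict fold over rows is the same fold over the projected pairs
theorem pv_fold_pairs (rows : List (String × String × String)) (user_id : String)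
    (b : PySem.Dict String (PySem.Dict String Unit)) :
    rows.foldl (pvStepM user_id) b = (pvPairs rows user_id).foldl pvStepP b := by
  induction rows generalizing b with
  | nil => rfl
  | cons r rest ih =>
    by_cases h : r.1 = user_id ∧ r.2.1 ≠ "" ∧ r.2.2 ≠ ""
    · simp [pvPairs, pvStepM, h] at *
      exact ih _
    · simp [pvPairs, pvStepM, h] at *
      exact ih _

theorem pv_ofList_concat {α : Type} [DecidableEq α] (l : List α) (a : α) :
    PySem.Set.ofList (l ++ [a]) = PySem.Set.add (PySem.Set.ofList l) a := by
  simp [PySem.Set.ofList_eq_foldl, List.foldl_append]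

theorem pv_prods_append (o : String) (pairs : List (String × String)) (q : String × String) :
    pvProds o (pairs ++ [q]) = pvProds o pairs ++ (if q.1 = o then [q.2] else []) := by
  simp only [pvProds, List.filterMap_append]
  congr 1
  by_cases h : q.1 = o <;> simp [h]

theorem pv_prods_nil (o : String) (pairs : List (String × String))
    (h : o ∉ pairs.map Prod.fst) : pvProds o pairs = [] := by
  rw [pvProds, List.filterMap_eq_nil_iff]
  intro q hq
  have : q.1 ≠ o := fun he => h (he ▸ List.mem_map_of_mem hq)
  simp [this]

-- the unit-dict fold, read out as (key, keys-of-value) pairs, is exactly B's staged computation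
theorem pv_M (pairs : List (String × String)) :
    ((pairs.foldl pvStepP PySem.Dict.empty).items).map (fun kv => (kv.1, kv.2.keys)) = pvG pairs := by
  induction pairs using List.reverseRecOn with
  | nil => simp [pvG, pvProds, PySem.Set.ofList, PySem.Dict.empty]
  | append_singleton pairs q ih =>
    obtain ⟨o, p⟩ := q
    set D := pairs.foldl pvStepP PySem.Dict.empty with hD
    rw [List.foldl_append, List.foldl_cons, List.foldl_nil]
    -- derived facts about D
    have hkeys : D.keys = PySem.Set.ofList (pairs.map Prod.fst) := by
      calc D.keys = (D.items.map (fun kv => (kv.1, kv.2.keys))).map Prod.fst := by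
            simp [PySem.Dict.keys, List.map_map, Function.comp]
        _ = (pvG pairs).map Prod.fst := by rw [ih]
        _ = PySem.Set.ofList (pairs.map Prod.fst) := by
            simp [pvG, List.map_map, Function.comp_def]
    have hnod : D.keys.Nodup := by rw [hkeys]; exact PySem.Set.nodup_ofList _
    have hpt : ∀ kv ∈ D.items, kv.2.keys = PySem.Set.ofList (pvProds kv.1 pairs) := by
      intro kv hkv
      have h1 : (kv.1, kv.2.keys) ∈ pvG pairs := ih ▸ List.mem_map_of_mem hkv
      simp only [pvG, List.mem_map, Prod.mk.injEq] at h1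
      obtain ⟨o', _, h2, h3⟩ := h1
      rw [← h3, h2]
    -- the new pairs list, staged side
    have hG : pvG (pairs ++ [(o, p)])
        = (PySem.Set.add (PySem.Set.ofList (pairs.map Prod.fst)) o).map
            (fun o' => (o', PySem.Set.ofList (pvProds o' (pairs ++ [(o, p)])))) := by
      simp [pvG, pv_ofList_concat]
    have hprods_ne : ∀ o', o' ≠ o →
        pvProds o' (pairs ++ [(o, p)]) = pvProds o' pairs := by
      intro o' hne
      rw [pv_prods_append]
      simp [Ne.symm hne]
    have hprods_eq : pvProds o (pairs ++ [(o, p)]) = pvProds o pairs ++ [p] := by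
      rw [pv_prods_append]; simp
    by_cases hc : D.contains o = true
    · -- order already present
      obtain ⟨d, hd⟩ : ∃ d, D.get? o = some d := by
        rw [PySem.Dict.contains_eq_isSome_get?] at hc
        exact Option.isSome_iff_exists.mp hc
      have hdk : d.keys = PySem.Set.ofList (pvProds o pairs) :=
        hpt (o, d) (PySem.Dict.mem_items_of_get?_eq_some D hd)
      have hmem : o ∈ PySem.Set.ofList (pairs.map Prod.fst) := by
        rw [← hkeys, ← PySem.Dict.contains_iff_mem_keys]; exact hc
      have hstep : pvStepP D (o, p) = D.insert o (d.insert p ()) := by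
        have : pvStepP D (o, p) = D.insert o ((D.getD o PySem.Dict.empty).insert p ()) := rfl
        rw [this, PySem.Dict.getD_of_get?_eq_some D _ hd]
      have hik : (d.insert p ()).keys = PySem.Set.add d.keys p := by
        by_cases hp : p ∈ d.keys
        · rw [PySem.Dict.keys_insert_of_contains d _ ((PySem.Dict.contains_iff_mem_keys d p).mpr hp)]
          simp [PySem.Set.add, PySem.Set.contains, hp]
        · rw [PySem.Dict.keys_insert_of_not_contains d _
            (by rw [← Bool.not_eq_true, PySem.Dict.contains_iff_mem_keys]; exact hp)]
          simp [PySem.Set.add, PySem.Set.contains, hp]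
      rw [hstep, hG]
      have horders : PySem.Set.add (PySem.Set.ofList (pairs.map Prod.fst)) o
          = PySem.Set.ofList (pairs.map Prod.fst) := by
        simp [PySem.Set.add, PySem.Set.contains, hmem]
      rw [horders, PySem.Dict.items_insert_of_contains D _ hc, List.map_map]
      -- both sides are maps over lists with the same underlying key sequence
      have hR : (PySem.Set.ofList (pairs.map Prod.fst)).map
            (fun o' => (o', PySem.Set.ofList (pvProds o' (pairs ++ [(o, p)]))))
          = D.items.map (fun kv => (kv.1, PySem.Set.ofList (pvProds kv.1 (pairs ++ [(o, p)])))) := by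
        rw [← hkeys]
        simp [PySem.Dict.keys, List.map_map, Function.comp]
      rw [hR]
      refine List.map_congr_left (fun kv hkv => ?_)
      obtain ⟨k1, k2⟩ := kv
      by_cases hk : k1 = o
      · subst hk
        have hv := PySem.Dict.get?_of_mem_items D hkv hnod
        rw [hd] at hv
        simp only [Option.some.injEq] at hv
        subst hv
        simp only [Function.comp, beq_self_eq_true, if_pos]
        rw [hik, hdk, hprods_eq, pv_ofList_concat]
      · simp only [Function.comp]
        rw [if_neg (by simpa using hk), hprods_ne k1 hk, hpt (k1, k2) hkv]
    · -- brand-new order id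
      have hcb : D.contains o = false := by simpa using hc
      have hnm : o ∉ pairs.map Prod.fst := by
        intro hm
        have : o ∈ PySem.Set.ofList (pairs.map Prod.fst) := (PySem.Set.mem_ofList _ _).mpr hm
        rw [← hkeys] at this
        exact absurd ((PySem.Dict.contains_iff_mem_keys D o).mpr this) hc
      have hnm' : o ∉ PySem.Set.ofList (pairs.map Prod.fst) := fun h =>
        hnm ((PySem.Set.mem_ofList _ _).mp h)
      have hstep : pvStepP D (o, p) = D.insert o (PySem.Dict.empty.insert p ()) := by
        have : pvStepP D (o, p) = D.insert o ((D.getD o PySem.Dict.empty).insert p ()) := rfl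
        rw [this, PySem.Dict.getD_of_not_contains D _ hcb]
      have hek : (PySem.Dict.empty.insert p () : PySem.Dict String Unit).keys = [p] := by
        rw [PySem.Dict.keys_insert_of_not_contains PySem.Dict.empty () (by simp)]
        simp
      rw [hstep, hG, PySem.Dict.items_insert_of_not_contains D _ hcb]
      have horders : PySem.Set.add (PySem.Set.ofList (pairs.map Prod.fst)) o
          = PySem.Set.ofList (pairs.map Prod.fst) ++ [o] := by
        simp [PySem.Set.add, PySem.Set.contains, hnm']
      rw [horders, List.map_append, List.map_append]
      congr 1
      · -- old orders unchanged
        rw [ih, pvG]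
        refine List.map_congr_left (fun o' ho' => ?_)
        have : o' ≠ o := fun he => hnm' (he ▸ ho')
        rw [hprods_ne o' this]
      · -- the new order
        simp only [List.map_cons, List.map_nil, hek]
        rw [hprods_eq, pv_prods_nil o pairs hnm]
        simp [PySem.Set.ofList, PySem.Set.add, PySem.Set.contains, PySem.Set.empty]

-- B's port equals pvG of the projected pairs
theorem pv_alt_eq (rows : List (String × String × String)) (user_id : String) :
    group_products_by_order_alt rows user_id = pvG (pvPairs rows user_id) := by
  simp [group_products_by_order_alt, pvG, pvPairs, pvProds]

-- ===== VERDICT (by name: the statement is the Claim_ definition above) =====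
theorem group_products_by_order_spec : Claim_equal_group_products_by_order := by
  intro rows user_id _
  unfold Spec_group_products_by_order group_products_by_order
  rw [pv_alt_eq, ← pv_M, ← pv_fold_pairs]
  exact pv_main rows user_id _ _ _ rfl rfl (by simp [PySem.Dict.keys_empty])
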